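-- pv_equiv track=rewrite | github.com/Netsouba/Projet-ISN | fonctions.py | croissance
-- ===== SOURCE A (Python) =====
-- def croissance(liste):
--     """ Retourne les variations d'une liste (Minima+Maxima, Indices)"""
--
--     liste_c=[]
--     liste_p=[]
--     croissant=None
--
--     for i in range(len(liste)-1):
--         if liste[i+1]>liste[i]:
--
--             if croissant==None:
--                 liste_c.append(True)
--
--             elif croissant==False:
--                 liste_p.append(i)
--
--                 liste_c.append(True)
--
--             croissant=True
--
--         elif liste[i+1]<liste[i]:
--
--             if croissant==None:
--                 liste_c.append(False)
--             elif croissant==True: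
--                 liste_p.append(i)
--
--                 liste_c.append(False)
--
--             croissant=False
--
--     return liste_p,liste_c
-- ===== SOURCE B (Python) =====
-- def croissance(liste):
--     """ Retourne les variations d'une liste (Minima+Maxima, Indices)"""
--     # phase 1: reduced table of (left index, is-increasing) for each unequal neighbour pair
--     flips = [(i, liste[i + 1] > liste[i])
--              for i in range(len(liste) - 1) if liste[i + 1] != liste[i]]
--     if not flips:
--         return [], []
--     # phase 2: scan the table, keeping only direction changes
--     liste_p = []
--     liste_c = [flips[0][1]]
--     prev = flips[0][1]
--     for i, up in flips[1:]:
--         if up != prev: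
--             liste_p.append(i)
--             liste_c.append(up)
--             prev = up
--     return liste_p, liste_c
-- ===== Notes on version B (the rewrite author's own statement) =====
-- stated objective: alternative
-- what changed: Replaces A's single fused loop with None-state tracking by a two-phase decomposition: first build a reduced (index, direction) table of all unequal adjacent pairs, then scan that table keeping only direction changes.
import Mathlib
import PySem

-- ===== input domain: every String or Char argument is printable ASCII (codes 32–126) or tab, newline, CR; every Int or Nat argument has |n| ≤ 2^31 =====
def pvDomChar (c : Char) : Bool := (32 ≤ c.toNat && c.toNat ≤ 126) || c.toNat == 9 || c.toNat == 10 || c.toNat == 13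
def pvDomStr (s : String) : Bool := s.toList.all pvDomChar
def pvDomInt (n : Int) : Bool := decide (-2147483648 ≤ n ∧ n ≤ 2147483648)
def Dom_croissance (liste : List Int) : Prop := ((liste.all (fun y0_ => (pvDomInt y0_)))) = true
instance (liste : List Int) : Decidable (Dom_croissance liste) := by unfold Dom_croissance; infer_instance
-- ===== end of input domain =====

-- B replaces A's fused None-tracking loop with a build-sign-table-then-scan-runs decomposition (alternative, same cost).

-- ===== PORT A =====
-- A's loop body, step for step (indices produced by the range are always in bounds, so pyGetD with default 0 is exact)
def croissanceStep (liste : List Int) (st : List Int × List Bool × Option Bool) (i : Int) :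
    List Int × List Bool × Option Bool :=
  if PySem.List.pyGetD liste (i + 1) 0 > PySem.List.pyGetD liste i 0 then
    if st.2.2 = none then (st.1, st.2.1 ++ [true], some true)
    else if st.2.2 = some false then (st.1 ++ [i], st.2.1 ++ [true], some true)
    else (st.1, st.2.1, some true)
  else if PySem.List.pyGetD liste (i + 1) 0 < PySem.List.pyGetD liste i 0 then
    if st.2.2 = none then (st.1, st.2.1 ++ [false], some false)
    else if st.2.2 = some true then (st.1 ++ [i], st.2.1 ++ [false], some false)
    else (st.1, st.2.1, some false)
  else st

def croissance (liste : List Int) : List Int × List Bool :=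
  let st := (PySem.List.pyRange 0 ((liste.length : Int) - 1) 1).foldl (croissanceStep liste) ([], [], none)
  (st.1, st.2.1)

-- ===== PORT B =====
-- phase 1: the reduced (index, is-increasing) table of unequal adjacent pairs
def croissanceFlip (liste : List Int) (i : Int) : Option (Int × Bool) :=
  if PySem.List.pyGetD liste (i + 1) 0 ≠ PySem.List.pyGetD liste i 0 then
    some (i, decide (PySem.List.pyGetD liste (i + 1) 0 > PySem.List.pyGetD liste i 0))
  else none

-- phase 2: keep only direction changes
def croissanceScan (st : List Int × List Bool × Bool) (f : Int × Bool) : List Int × List Bool × Bool :=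
  if f.2 ≠ st.2.2 then (st.1 ++ [f.1], st.2.1 ++ [f.2], f.2) else st

def croissance_alt (liste : List Int) : List Int × List Bool :=
  let flips := (PySem.List.pyRange 0 ((liste.length : Int) - 1) 1).filterMap (croissanceFlip liste)
  match flips with
  | [] => ([], [])
  | (_, u0) :: rest =>
    let r := rest.foldl croissanceScan ([], [u0], u0)
    (r.1, r.2.1)

-- ===== PRECONDITION & SPEC =====
def Spec_croissance (liste : List Int) (out : List Int × List Bool) : Prop := out = croissance_alt liste
instance (liste : List Int) (out : List Int × List Bool) : Decidable (Spec_croissance liste out) := by unfold Spec_croissance; infer_instance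

-- ===== CLAIM (what is proved, stated in full; the proofs are below) =====
def Claim_equal_croissance : Prop := ∀ (liste : List Int), Dom_croissance liste → Spec_croissance liste (croissance liste)

-- ===== LEMMAS AND PROOFS =====

-- A's step on the reduced-table alphabet
def croissanceStep' (st : List Int × List Bool × Option Bool) (f : Int × Bool) :
    List Int × List Bool × Option Bool :=
  if st.2.2 = none then (st.1, st.2.1 ++ [f.2], some f.2)
  else if st.2.2 = some (!f.2) then (st.1 ++ [f.1], st.2.1 ++ [f.2], some f.2)
  else (st.1, st.2.1, some f.2)

theorem croissanceStep_eq (liste : List Int) (st : List Int × List Bool × Option Bool) (i : Int) :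
    croissanceStep liste st i = (croissanceFlip liste i).elim st (croissanceStep' st) := by
  unfold croissanceStep croissanceFlip croissanceStep'
  rcases lt_trichotomy (PySem.List.pyGetD liste (i + 1) 0) (PySem.List.pyGetD liste i 0) with h | h | h
  · have h1 : ¬ PySem.List.pyGetD liste (i + 1) 0 > PySem.List.pyGetD liste i 0 := by omega
    have h2 : PySem.List.pyGetD liste (i + 1) 0 ≠ PySem.List.pyGetD liste i 0 := by omega
    simp [h, h1, h2]
  · simp [h]
  · have h2 : PySem.List.pyGetD liste (i + 1) 0 ≠ PySem.List.pyGetD liste i 0 := by omega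
    simp [h, h2]

-- folding A's step over the indices = folding the reduced-table step over the filterMap
theorem foldl_filterMap_elim {α β γ : Type} (g : α → Option β) (s : γ → β → γ)
    (l : List α) (init : γ) :
    l.foldl (fun st a => (g a).elim st (s st)) init = (l.filterMap g).foldl s init := by
  induction l generalizing init with
  | nil => rfl
  | cons a t ih =>
    cases h : g a <;> simp [h, ih]

-- once the direction is set, A's step coincides with B's scan
theorem foldl_step'_some (rest : List (Int × Bool)) (lp : List Int) (lc : List Bool) (prev : Bool) :
    rest.foldl croissanceStep' (lp, lc, some prev) =
      (let r := rest.foldl croissanceScan (lp, lc, prev); (r.1, r.2.1, some r.2.2)) := by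
  induction rest generalizing lp lc prev with
  | nil => rfl
  | cons f t ih =>
    rcases f with ⟨i, u⟩
    by_cases h : u = prev
    · subst h
      simp only [List.foldl_cons, croissanceStep', croissanceScan]
      simp [ih]
    · have h' : prev = !u := by cases u <;> cases prev <;> simp_all
      simp only [List.foldl_cons, croissanceStep', croissanceScan]
      simp [h', ih]

theorem croissance_eq_alt (liste : List Int) : croissance liste = croissance_alt liste := by
  unfold croissance croissance_alt
  have hfold : ∀ (l : List Int) (init : List Int × List Bool × Option Bool),
      l.foldl (croissanceStep liste) init = (l.filterMap (croissanceFlip liste)).foldl croissanceStep' init := by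
    intro l init
    rw [← foldl_filterMap_elim (croissanceFlip liste) croissanceStep' l init]
    induction l generalizing init with
    | nil => rfl
    | cons a t ih => simp only [List.foldl_cons, croissanceStep_eq liste init a, ih]
  rw [hfold]
  cases hf : (PySem.List.pyRange 0 ((liste.length : Int) - 1) 1).filterMap (croissanceFlip liste) with
  | nil => rfl
  | cons f rest =>
    rcases f with ⟨i0, u0⟩
    simp only [List.foldl_cons]
    have h0 : croissanceStep' ([], [], none) (i0, u0) = ([], [u0], some u0) := by
      simp [croissanceStep']
    rw [h0, foldl_step'_some]

-- ===== VERDICT (by name: the statement is the Claim_ definition above) =====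
theorem croissance_spec : Claim_equal_croissance := by
  intro liste _
  unfold Spec_croissance
  exact croissance_eq_alt liste
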